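-- pv_equiv track=rewrite | github.com/MuazzamW/ICS4U-Exercises | Recursion/recursionLab.py | pairedLetter
-- ===== SOURCE A (Python) =====
-- def pairedLetter(s):
--     if len(s)<3:
--         return 0
--     else:
--         if s[0] == s[2]:
--             return 1 + pairedLetter(s[1:])
--         else:
--             return pairedLetter(s[1:])
-- ===== SOURCE B (Python) =====
-- def pairedLetter(s):
--     count = 0
--     for i in range(len(s) - 2):
--         if s[i] == s[i + 2]:
--             count += 1
--     return count
-- ===== Notes on version B (the rewrite author's own statement) =====
-- stated objective: faster
-- what changed: Replaced the recursion over successive string slices (each call slices s[1:]) with a single flat loop over indices counting positions where s[i] == s[i+2].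
import Mathlib
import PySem

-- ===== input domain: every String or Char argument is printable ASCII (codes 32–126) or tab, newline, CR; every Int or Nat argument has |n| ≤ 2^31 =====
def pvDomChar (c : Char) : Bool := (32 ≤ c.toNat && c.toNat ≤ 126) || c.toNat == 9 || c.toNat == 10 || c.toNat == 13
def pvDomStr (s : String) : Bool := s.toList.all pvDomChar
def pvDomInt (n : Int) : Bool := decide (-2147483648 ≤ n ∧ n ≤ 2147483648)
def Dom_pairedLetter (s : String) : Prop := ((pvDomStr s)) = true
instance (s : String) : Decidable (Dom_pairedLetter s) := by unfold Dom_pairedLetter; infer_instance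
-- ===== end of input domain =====

-- B replaces A's recursion over repeated slices by one flat indexed counting pass; return values agree on all inputs.

-- ===== PORT A =====
-- A's recursion: len(s)<3 → 0; else compare s[0] with s[2] and recurse on s[1:].
def pairedLetterRec : List Char → Int
  | a :: b :: c :: rest =>
      if a == c then 1 + pairedLetterRec (b :: c :: rest)
      else pairedLetterRec (b :: c :: rest)
  | _ => 0

def pairedLetter (s : String) : Int := pairedLetterRec s.toList

-- ===== PORT B =====
-- B's flat loop: for i in range(len(s)-2): if s[i]==s[i+2]: count += 1
def pairedLetter_alt (s : String) : Int :=
  (List.range (s.toList.length - 2)).foldl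
    (fun count i => if s.toList[i]? == s.toList[i + 2]? then count + 1 else count) 0

-- ===== PRECONDITION & SPEC =====
def Spec_pairedLetter (s : String) (out : Int) : Prop := out = pairedLetter_alt s
instance (s : String) (out : Int) : Decidable (Spec_pairedLetter s out) := by unfold Spec_pairedLetter; infer_instance

-- ===== CLAIM (what is proved, stated in full; the proofs are below) =====
def Claim_equal_pairedLetter : Prop := ∀ (s : String), Dom_pairedLetter s → Spec_pairedLetter s (pairedLetter s)

-- ===== LEMMAS AND PROOFS =====

theorem pvFoldlCount (p : Nat → Bool) (is : List Nat) (acc : Int) :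
    is.foldl (fun a i => if p i then a + 1 else a) acc = acc + (is.countP p : Int) := by
  induction is generalizing acc with
  | nil => simp
  | cons i is ih =>
      simp only [List.foldl_cons, List.countP_cons, ih]
      by_cases h : p i = true
      · simp [h]; ring
      · simp [h]

theorem pvRecEqCount (l : List Char) :
    pairedLetterRec l = ((List.range (l.length - 2)).countP (fun i => l[i]? == l[i + 2]?) : Int) := by
  match l with
  | [] => simp [pairedLetterRec]
  | [a] => simp [pairedLetterRec]
  | [a, b] => simp [pairedLetterRec]
  | a :: b :: c :: rest =>
      have ih := pvRecEqCount (b :: c :: rest)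
      have hlen : (a :: b :: c :: rest).length - 2 = ((b :: c :: rest).length - 2) + 1 := by
        simp
      rw [hlen, List.range_succ_eq_map, List.countP_cons, List.countP_map]
      have hc : List.countP ((fun i => (a :: b :: c :: rest)[i]? == (a :: b :: c :: rest)[i + 2]?) ∘ Nat.succ)
            (List.range ((b :: c :: rest).length - 2))
          = List.countP (fun i => (b :: c :: rest)[i]? == (b :: c :: rest)[i + 2]?)
            (List.range ((b :: c :: rest).length - 2)) :=
        List.countP_congr (fun i _ => Iff.rfl)
      rw [hc]
      by_cases h : a == c
      · have h0 : ((fun i => (a :: b :: c :: rest)[i]? == (a :: b :: c :: rest)[i + 2]?) 0) = true := by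
          simpa using h
        simp only [pairedLetterRec, h, if_pos, ih, h0]
        push_cast; ring
      · have h0 : ((fun i => (a :: b :: c :: rest)[i]? == (a :: b :: c :: rest)[i + 2]?) 0) = false := by
          simpa using h
        simp only [pairedLetterRec, h, ih, h0]
        push_cast; ring

-- ===== VERDICT (by name: the statement is the Claim_ definition above) =====
theorem pairedLetter_spec : Claim_equal_pairedLetter := by
  intro s _
  unfold Spec_pairedLetter pairedLetter pairedLetter_alt
  rw [pvRecEqCount, pvFoldlCount]
  simp
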